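-- pv_equiv track=rewrite | github.com/tuur/WLLETlinkClassification | lib/data.py | get_paragraph_boundaries
-- ===== SOURCE A (Python) =====
-- def get_paragraph_boundaries(text):
-- 	boundaries = []
-- 	character_index_to_paragraph_index = {}
-- 	prev = ''
-- 	for i, char in enumerate(text):
-- 		character_index_to_paragraph_index[i] = len(boundaries)
-- 		if char == '\n' and prev =='\n':
-- 			boundaries.append(i)
-- 		prev=char
-- 	return boundaries, character_index_to_paragraph_index
-- ===== SOURCE B (Python) =====
-- def get_paragraph_boundaries(text):
--     n = len(text)
--     boundaries = [i for i in range(1, n) if text[i] == '\n' and text[i - 1] == '\n']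
--     character_index_to_paragraph_index = {i: sum(1 for b in boundaries if b < i) for i in range(n)}
--     return boundaries, character_index_to_paragraph_index
-- ===== Notes on version B (the rewrite author's own statement) =====
-- stated objective: simpler
-- what changed: Replaces the single stateful loop (prev-char tracking, dict recording list length before a conditional append) by two independent comprehensions: an adjacent-pair index filter for the boundaries, then a counting pass (number of boundaries < i) for the char-to-paragraph map.
import Mathlib
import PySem

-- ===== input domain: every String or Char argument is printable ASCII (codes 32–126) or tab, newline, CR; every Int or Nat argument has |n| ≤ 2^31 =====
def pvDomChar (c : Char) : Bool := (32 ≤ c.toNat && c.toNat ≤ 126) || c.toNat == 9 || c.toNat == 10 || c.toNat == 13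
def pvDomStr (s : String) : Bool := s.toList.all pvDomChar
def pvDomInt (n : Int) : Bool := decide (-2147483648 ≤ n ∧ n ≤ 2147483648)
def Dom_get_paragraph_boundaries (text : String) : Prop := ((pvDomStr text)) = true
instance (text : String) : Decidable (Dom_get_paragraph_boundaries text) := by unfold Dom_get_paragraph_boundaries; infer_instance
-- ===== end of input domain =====

-- B replaces A's single stateful loop by two independent comprehensions (boundary filter,
-- then boundary-count map); objective: simpler. Equivalence of the return value is proved on all inputs.

-- ===== PORT A =====
-- the for-loop over enumerate(text) with state (boundaries, dict, prev); prev = none plays Python's initial prev = ''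
def pvALoop : List (Int × Char) → List Int → PySem.Dict Int Int → Option Char → (List Int × PySem.Dict Int Int)
  | [], bs, d, _ => (bs, d)
  | (i, c) :: rest, bs, d, p =>
      let d' := d.insert i (bs.length : Int)
      let bs' := if c = '\n' ∧ p = some '\n' then bs ++ [i] else bs
      pvALoop rest bs' d' (some c)

def get_paragraph_boundaries (text : String) : List Int × (List (Int × Int)) :=
  ((pvALoop (PySem.List.enumerate text.toList 0) [] PySem.Dict.empty none).1,
   (pvALoop (PySem.List.enumerate text.toList 0) [] PySem.Dict.empty none).2.items)

-- ===== PORT B =====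
-- [i for i in range(1, n) if text[i]=='\n' and text[i-1]=='\n']; the indices visited are in
-- range, so pyGet? (Python indexing) always returns some and the == test is exact
def pvBoundsB (cs : List Char) : List Int :=
  (PySem.List.pyRange 1 (cs.length : Int) 1).filter
    (fun i => PySem.List.pyGet? cs i == some '\n' && PySem.List.pyGet? cs (i - 1) == some '\n')

-- {i: sum(1 for b in boundaries if b < i) for i in range(n)}
def get_paragraph_boundaries_alt (text : String) : List Int × (List (Int × Int)) :=
  (pvBoundsB text.toList,
   (PySem.List.pyRange 0 (text.toList.length : Int) 1).map
     (fun i => (i, (((pvBoundsB text.toList).filter (fun b => b < i)).length : Int))))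

-- ===== PRECONDITION & SPEC =====
def Spec_get_paragraph_boundaries (text : String) (out : List Int × (List (Int × Int))) : Prop := out = get_paragraph_boundaries_alt text
instance (text : String) (out : List Int × (List (Int × Int))) : Decidable (Spec_get_paragraph_boundaries text out) := by unfold Spec_get_paragraph_boundaries; infer_instance

-- ===== CLAIM (what is proved, stated in full; the proofs are below) =====
def Claim_equal_get_paragraph_boundaries : Prop := ∀ (text : String), Dom_get_paragraph_boundaries text → Spec_get_paragraph_boundaries text (get_paragraph_boundaries text)

-- ===== LEMMAS AND PROOFS =====

-- reference boundary list: indices k, k+1, … of cs at which char = '\n' and previous char p = '\n'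
def pvBnd : Option Char → Int → List Char → List Int
  | _, _, [] => []
  | p, k, c :: rest => (if c = '\n' ∧ p = some '\n' then [k] else []) ++ pvBnd (some c) (k + 1) rest

lemma pvBnd_ge : ∀ (cs : List Char) (p : Option Char) (k : Int), ∀ b ∈ pvBnd p k cs, k ≤ b := by
  intro cs
  induction cs with
  | nil => intro p k b hb; simp [pvBnd] at hb
  | cons c rest ih =>
      intro p k b hb
      simp only [pvBnd, List.mem_append] at hb
      rcases hb with hb | hb
      · split at hb <;> simp_all
      · have := ih (some c) (k + 1) b hb; omega

lemma pvALoop_spec : ∀ (cs : List Char) (k : Int) (bs : List Int) (d : PySem.Dict Int Int) (p : Option Char),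
    (∀ j ∈ d.keys, j < k) →
    (pvALoop (PySem.List.enumerate cs k) bs d p).1 = bs ++ pvBnd p k cs ∧
    (pvALoop (PySem.List.enumerate cs k) bs d p).2.items =
      d.items ++ (PySem.List.pyRange k (k + cs.length) 1).map
        (fun i => (i, (bs.length : Int) + (((pvBnd p k cs).filter (fun b => b < i)).length : Int))) := by
  intro cs
  induction cs with
  | nil =>
      intro k bs d p hk
      simp [PySem.List.enumerate_nil, pvALoop, pvBnd, PySem.List.pyRange_one_eq_nil (le_refl k)]
  | cons c rest ih =>
      intro k bs d p hk
      have hcont : d.contains k = false := by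
        by_contra h
        have h' : d.contains k = true := by simpa using h
        have : k ∈ d.keys := (PySem.Dict.contains_iff_mem_keys d k).mp h'
        exact absurd (hk k this) (by omega)
      have hk' : ∀ j ∈ (d.insert k ((bs.length : Int))).keys, j < k + 1 := by
        intro j hj
        rcases (PySem.Dict.mem_keys_insert d k j ((bs.length : Int))).mp hj with h | h
        · omega
        · have := hk j h; omega
      rw [PySem.List.enumerate_cons]
      simp only [pvALoop]
      obtain ⟨ih1, ih2⟩ := ih (k + 1)
        (if c = '\n' ∧ p = some '\n' then bs ++ [k] else bs)
        (d.insert k ((bs.length : Int))) (some c) hk'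
      have hins : (d.insert k ((bs.length : Int))).items = d.items ++ [(k, ((bs.length : Int)))] := by
        rw [PySem.Dict.items_insert]
        simp [hcont]
      constructor
      · rw [ih1]
        simp only [pvBnd]
        split_ifs <;> simp
      · rw [ih2, hins]
        have hrange : PySem.List.pyRange k (k + ((c :: rest).length : Int)) 1 =
            k :: PySem.List.pyRange (k + 1) (k + ((c :: rest).length : Int)) 1 := by
          apply PySem.List.pyRange_one_cons
          simp only [List.length_cons]
          push_cast
          omega
        rw [hrange, List.map_cons, List.append_assoc, List.singleton_append]
        congr 1
        congr 1
        · -- the entry recorded at index k: no boundary of pvBnd p k (c::rest) is < k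
          have hfilt : (pvBnd p k (c :: rest)).filter (fun b => b < k) = [] := by
            apply List.filter_eq_nil_iff.mpr
            intro b hb
            have := pvBnd_ge (c :: rest) p k b hb
            simp
            omega
          rw [hfilt]
          simp
        · -- later entries: splitting off the possible boundary at k
          have hend : k + ((c :: rest).length : Int) = (k + 1) + (rest.length : Int) := by
            push_cast [List.length_cons]; omega
          rw [hend]
          apply List.map_congr_left
          intro i hi
          simp only [PySem.List.mem_pyRange_one] at hi
          have hki : k < i := by omega
          by_cases hc : c = '\n' ∧ p = some '\n'
          · simp only [pvBnd, if_pos hc, List.length_append,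
              List.singleton_append, List.filter_cons]
            simp only [decide_eq_true_eq, if_pos hki, List.length_cons, List.length_nil,
              Prod.mk.injEq, true_and]
            push_cast
            omega
          · simp only [pvBnd, if_neg hc, List.nil_append]
      
lemma pyGet?_pred_append (pre rest : List Char) (h : pre ≠ []) :
    PySem.List.pyGet? (pre ++ rest) ((pre.length : Int) - 1) = some (pre.getLast h) := by
  have hlen : 0 < pre.length := List.length_pos_of_ne_nil h
  have hidx : ((pre.length : Int) - 1) = ((pre.length - 1 : Nat) : Int) := by omega
  rw [hidx, PySem.List.pyGet?_natCast]
  rw [List.getElem?_append_left (by omega)]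
  rw [List.getElem?_eq_getElem (by omega)]
  congr 1
  exact (List.getLast_eq_getElem h).symm

lemma pvBnd_eq_filter_aux : ∀ (cs pre : List Char) (h : pre ≠ []),
    pvBnd (some (pre.getLast h)) (pre.length : Int) cs =
      (PySem.List.pyRange (pre.length : Int) ((pre.length : Int) + cs.length) 1).filter
        (fun i => PySem.List.pyGet? (pre ++ cs) i == some '\n' &&
                  PySem.List.pyGet? (pre ++ cs) (i - 1) == some '\n') := by
  intro cs
  induction cs with
  | nil =>
      intro pre h
      simp [pvBnd, PySem.List.pyRange_one_eq_nil]
  | cons c rest ih =>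
      intro pre h
      have hrange : PySem.List.pyRange (pre.length : Int) ((pre.length : Int) + ((c :: rest).length : Int)) 1 =
          (pre.length : Int) :: PySem.List.pyRange ((pre.length : Int) + 1) ((pre.length : Int) + ((c :: rest).length : Int)) 1 := by
        apply PySem.List.pyRange_one_cons
        push_cast [List.length_cons]; omega
      rw [hrange, List.filter_cons]
      have hget : PySem.List.pyGet? (pre ++ c :: rest) ((pre.length : Int)) = some c :=
        PySem.List.pyGet?_append_length pre rest c
      have hgetp : PySem.List.pyGet? (pre ++ c :: rest) ((pre.length : Int) - 1) = some (pre.getLast h) :=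
        pyGet?_pred_append pre (c :: rest) h
      have hcond : (PySem.List.pyGet? (pre ++ c :: rest) ((pre.length : Int)) == some '\n' &&
            PySem.List.pyGet? (pre ++ c :: rest) ((pre.length : Int) - 1) == some '\n') =
          decide (c = '\n' ∧ pre.getLast h = '\n') := by
        rw [hget, hgetp]
        by_cases h1 : c = '\n' <;> by_cases h2 : pre.getLast h = '\n' <;> simp [h1, h2]
      rw [hcond]
      have htail := ih (pre ++ [c]) (by simp)
      have hlast : (pre ++ [c]).getLast (by simp) = c := List.getLast_concat
      have hlen2 : (((pre ++ [c]).length : Int)) = (pre.length : Int) + 1 := by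
        push_cast [List.length_append, List.length_singleton]; omega
      have hlist : (pre ++ [c]) ++ rest = pre ++ c :: rest := by simp
      rw [hlast, hlen2, hlist] at htail
      have hend : ((pre.length : Int) + 1) + (rest.length : Int) = (pre.length : Int) + ((c :: rest).length : Int) := by
        push_cast [List.length_cons]; omega
      rw [hend] at htail
      rw [← htail]
      simp only [pvBnd]
      by_cases hc : c = '\n' ∧ pre.getLast h = '\n'
      · simp [hc]
      · simp only [Option.some.injEq]
        rw [if_neg hc]
        simp [hc]

lemma pvBoundsB_eq (cs : List Char) : pvBoundsB cs = pvBnd none 0 cs := by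
  cases cs with
  | nil => simp [pvBoundsB, pvBnd, PySem.List.pyRange_one_eq_nil]
  | cons c rest =>
      have h := pvBnd_eq_filter_aux rest [c] (by simp)
      simp only [List.getLast_singleton, List.length_singleton, List.singleton_append,
        Nat.cast_one] at h
      have hend : (1 : Int) + (rest.length : Int) = (((c :: rest).length : Int)) := by
        push_cast [List.length_cons]; omega
      rw [hend] at h
      have h0 : pvBnd none 0 (c :: rest) = pvBnd (some c) 1 rest := by
        simp [pvBnd]
      rw [pvBoundsB, h0, ← h]

-- ===== VERDICT (by name: the statement is the Claim_ definition above) =====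
theorem get_paragraph_boundaries_spec : Claim_equal_get_paragraph_boundaries := by
  intro text _
  unfold Spec_get_paragraph_boundaries get_paragraph_boundaries get_paragraph_boundaries_alt
  obtain ⟨h1, h2⟩ := pvALoop_spec text.toList 0 [] PySem.Dict.empty none
    (by intro j hj; simp [PySem.Dict.keys_empty] at hj)
  have hempty : (PySem.Dict.empty : PySem.Dict Int Int).items = [] := rfl
  refine Prod.ext ?_ ?_
  · rw [h1, pvBoundsB_eq]
    simp
  · rw [h2, hempty, pvBoundsB_eq]
    simp
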